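-- pv_equiv track=rewrite | github.com/Tomikoma/opencv | utils.py | get_enar_from_dict
-- ===== SOURCE A (Python) =====
-- def get_enar_from_dict(enar_dict):
--     if isinstance(enar_dict, dict):
--         enar4 = enar5 = ""
--         enar4_num = enar5_num = -1
--         for key, value in enar_dict.items():
--             if len(key) == 4:
--                 if value > enar4_num:
--                     enar4 = key
--                     enar4_num = value
--
--         for key, value in enar_dict.items():
--             if len(key) == 5 and key[:4] == enar4:
--                 if value > enar5_num:
--                     enar5 = key
--                     enar5_num = value
--         return enar4, enar5
--     else:
--         return "----", "-----"
-- ===== SOURCE B (Python) =====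
-- def get_enar_from_dict(enar_dict):
--     if isinstance(enar_dict, dict):
--         enar4 = ""
--         enar4_num = -1
--         best5 = {}  # prefix -> (best 5-char key, its value), strict-> first-wins, -1 floor
--         for key, value in enar_dict.items():
--             n = len(key)
--             if n == 4:
--                 if value > enar4_num:
--                     enar4 = key
--                     enar4_num = value
--             elif n == 5:
--                 p = key[:4]
--                 if value > best5.get(p, ("", -1))[1]:
--                     best5[p] = (key, value)
--         return enar4, best5.get(enar4, ("", -1))[0]
--     else:
--         return "----", "-----"
-- ===== Notes on version B (the rewrite author's own statement) =====
-- stated objective: alternative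
-- what changed: Replaces A's two dependent scans (find best 4-char key, then rescan for the best 5-char key with that prefix) by a single pass that maintains the best 4-char key and a dict prefix->(best 5-char key, value), finishing with one dict lookup.
import Mathlib
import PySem

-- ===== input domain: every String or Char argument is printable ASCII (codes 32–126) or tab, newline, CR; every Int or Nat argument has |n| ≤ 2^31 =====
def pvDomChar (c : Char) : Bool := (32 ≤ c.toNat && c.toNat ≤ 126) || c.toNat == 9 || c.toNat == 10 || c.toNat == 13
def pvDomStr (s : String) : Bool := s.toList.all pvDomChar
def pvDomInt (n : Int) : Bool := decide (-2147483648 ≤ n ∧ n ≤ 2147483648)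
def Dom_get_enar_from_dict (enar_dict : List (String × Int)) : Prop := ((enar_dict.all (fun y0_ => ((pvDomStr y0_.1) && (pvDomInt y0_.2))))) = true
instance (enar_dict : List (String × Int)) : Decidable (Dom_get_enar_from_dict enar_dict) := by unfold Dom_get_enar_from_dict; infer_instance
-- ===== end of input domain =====

-- B replaces A's two dependent scans by ONE pass keeping the best 4-char key and a
-- dict prefix -> (best 5-char key, value), then a single lookup (objective: alternative one-pass decomposition).

-- key[:4] (shared helper; exact: nonnegative slice clamps like Python)
def pre4 (k : String) : String := PySem.Str.slice k none (some 4)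

-- ===== PORT A =====
-- first loop of A: best 4-char key, strict '>', sentinel -1
def stepA4 (st : String × Int) (kv : String × Int) : String × Int :=
  if kv.1.toList.length = 4 then (if kv.2 > st.2 then (kv.1, kv.2) else st) else st

-- second loop of A, for target prefix t
def stepA5 (t : String) (st : String × Int) (kv : String × Int) : String × Int :=
  if kv.1.toList.length = 5 ∧ pre4 kv.1 = t then (if kv.2 > st.2 then (kv.1, kv.2) else st) else st

def get_enar_from_dict (enar_dict : List (String × Int)) : String × String :=
  -- the input is a dict by the type convention, so isinstance(enar_dict, dict) is always true
  let r4 := enar_dict.foldl stepA4 ("", -1)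
  let r5 := enar_dict.foldl (stepA5 r4.1) ("", -1)
  (r4.1, r5.1)

-- ===== PORT B =====
def stepB (st : (String × Int) × PySem.Dict String (String × Int)) (kv : String × Int) :
    (String × Int) × PySem.Dict String (String × Int) :=
  let n := kv.1.toList.length
  if n = 4 then
    (if kv.2 > st.1.2 then ((kv.1, kv.2), st.2) else st)
  else if n = 5 then
    let p := pre4 kv.1
    if kv.2 > (st.2.getD p ("", -1)).2 then (st.1, st.2.insert p (kv.1, kv.2)) else st
  else st

def get_enar_from_dict_alt (enar_dict : List (String × Int)) : String × String :=
  let r := enar_dict.foldl stepB (("", -1), PySem.Dict.empty)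
  (r.1.1, (r.2.getD r.1.1 ("", -1)).1)

-- ===== PRECONDITION & SPEC =====
def Spec_get_enar_from_dict (enar_dict : List (String × Int)) (out : String × String) : Prop := out = get_enar_from_dict_alt enar_dict
instance (enar_dict : List (String × Int)) (out : String × String) : Decidable (Spec_get_enar_from_dict enar_dict out) := by unfold Spec_get_enar_from_dict; infer_instance

-- ===== CLAIM (what is proved, stated in full; the proofs are below) =====
def Claim_equal_get_enar_from_dict : Prop := ∀ (enar_dict : List (String × Int)), Dom_get_enar_from_dict enar_dict → Spec_get_enar_from_dict enar_dict (get_enar_from_dict enar_dict)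

-- ===== LEMMAS AND PROOFS =====

-- B's dict-only step (what stepB does to the second component)
def stepD (d : PySem.Dict String (String × Int)) (kv : String × Int) :
    PySem.Dict String (String × Int) :=
  if kv.1.toList.length = 5 then
    (if kv.2 > (d.getD (pre4 kv.1) ("", -1)).2 then d.insert (pre4 kv.1) (kv.1, kv.2) else d)
  else d

-- B's fold splits componentwise into A's 4-char fold and the dict fold
theorem foldB_split (l : List (String × Int)) (st : String × Int)
    (d : PySem.Dict String (String × Int)) :
    l.foldl stepB (st, d) = (l.foldl stepA4 st, l.foldl stepD d) := by
  induction l generalizing st d with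
  | nil => rfl
  | cons kv l ih =>
    simp only [List.foldl_cons]
    rw [show stepB (st, d) kv = (stepA4 st kv, stepD d kv) from ?_, ih]
    simp only [stepB, stepA4, stepD]
    by_cases h4 : kv.1.length = 4
    · simp [h4]; split <;> rfl
    · by_cases h5 : kv.1.length = 5
      · simp [h5]; split <;> rfl
      · simp [h4, h5]

-- the dict entry at any target t tracks exactly A's second loop for that t
theorem foldD_getD (t : String) (l : List (String × Int))
    (d : PySem.Dict String (String × Int)) (st : String × Int)
    (h : d.getD t ("", -1) = st) :
    (l.foldl stepD d).getD t ("", -1) = l.foldl (stepA5 t) st := by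
  induction l generalizing d st with
  | nil => simpa using h
  | cons kv l ih =>
    simp only [List.foldl_cons]
    by_cases h5 : kv.1.length = 5
    · by_cases hp : pre4 kv.1 = t
      · by_cases hv : kv.2 > st.2
        · have : stepD d kv = d.insert t (kv.1, kv.2) := by
            simp [stepD, h5, hp, h, hv]
          rw [this, show stepA5 t st kv = (kv.1, kv.2) by simp [stepA5, h5, hp, hv]]
          exact ih _ _ (PySem.Dict.getD_insert_self _ _ _ _)
        · have : stepD d kv = d := by simp [stepD, h5, hp, h, hv]
          rw [this, show stepA5 t st kv = st by simp [stepA5, h5, hp, hv]]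
          exact ih _ _ h
      · have : (stepD d kv).getD t ("", -1) = st := by
          unfold stepD
          split_ifs
          · rw [PySem.Dict.getD_insert_of_ne _ _ _ (fun h' => hp h'.symm)]; exact h
          · exact h
          · exact h
        rw [show stepA5 t st kv = st by simp [stepA5, hp]]
        exact ih _ _ this
    · rw [show stepD d kv = d by simp [stepD, h5],
          show stepA5 t st kv = st by simp [stepA5, h5]]
      exact ih _ _ h

-- ===== VERDICT (by name: the statement is the Claim_ definition above) =====
theorem get_enar_from_dict_spec : Claim_equal_get_enar_from_dict := by
  intro l _
  show get_enar_from_dict l = get_enar_from_dict_alt l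
  unfold get_enar_from_dict get_enar_from_dict_alt
  rw [foldB_split]
  have h := foldD_getD (l.foldl stepA4 ("", -1)).1 l PySem.Dict.empty ("", -1)
      (by simp [PySem.Dict.getD_empty])
  simp only [h]
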